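-- pv_equiv track=rewrite | github.com/jiadaizhao/LintCode | 1701-1800/1789-Distinguish Username/1789-Distinguish Username.py | DistinguishUsername
-- ===== SOURCE A (Python) =====
-- def DistinguishUsername(names):
--     # Write your code here
--     result = [''] * len(names)
--     table = {}
--     for i, name in enumerate(names):
--         if name in table:
--             result[i] = name + str(table[name])
--             table[name] += 1
--         else:
--             result[i] = name
--             table[name] = 1
--
--     return result
-- ===== SOURCE B (Python) =====
-- def DistinguishUsername(names):
--     # Group-then-fill: one pass groups the indices of each name, a second pass
--     # fills a preallocated buffer group by group (j-th occurrence gets suffix j).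
--     groups = {}
--     for i, name in enumerate(names):
--         groups.setdefault(name, []).append(i)
--     result = [''] * len(names)
--     for name, idxs in groups.items():
--         for j, pos in enumerate(idxs):
--             result[pos] = name if j == 0 else name + str(j)
--     return result
-- ===== Notes on version B (the rewrite author's own statement) =====
-- stated objective: alternative
-- what changed: Replaces A's single streaming pass with a mutable per-name counter by a group-then-fill two-pass: first build a dict mapping each name to the list of its indices, then fill a preallocated result buffer group by group, writing name for the first index of a group and name+str(j) for its j-th index.
import Mathlib
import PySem

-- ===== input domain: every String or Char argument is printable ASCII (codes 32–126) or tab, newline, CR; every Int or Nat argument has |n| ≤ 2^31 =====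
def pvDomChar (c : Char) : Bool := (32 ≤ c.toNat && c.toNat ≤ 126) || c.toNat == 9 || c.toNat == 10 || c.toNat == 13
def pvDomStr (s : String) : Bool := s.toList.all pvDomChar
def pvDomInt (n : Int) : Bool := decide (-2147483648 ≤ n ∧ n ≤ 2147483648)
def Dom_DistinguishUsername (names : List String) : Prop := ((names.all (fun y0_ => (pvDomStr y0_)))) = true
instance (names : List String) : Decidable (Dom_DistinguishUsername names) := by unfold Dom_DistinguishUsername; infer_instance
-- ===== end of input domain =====

-- B replaces A's streaming counter pass by a group-then-fill two-pass: group the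
-- indices of each name, then fill a preallocated buffer group by group (objective: alternative).

-- ===== PORT A =====
-- loop body of A's for-loop (the if name in table / else branches)
def AStep (st : List String × PySem.Dict String Int) (p : Int × String) :
    List String × PySem.Dict String Int :=
  match st.2.get? p.2 with
  | some v => (PySem.List.pySetD st.1 p.1 (p.2 ++ PySem.Int.toStr v), st.2.insert p.2 (v + 1))
  | none   => (PySem.List.pySetD st.1 p.1 p.2, st.2.insert p.2 1)

def DistinguishUsername (names : List String) : List String :=
  ((PySem.List.enumerate names).foldl AStep
    (List.replicate names.length "", PySem.Dict.empty)).1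

-- ===== PORT B =====
-- first pass: groups.setdefault(name, []).append(i)  ==  d[name] = d.get(name, []) ++ [i],
-- which is exactly PySem.Dict.modify (position kept for old keys, new keys appended)
def BGroups (names : List String) : PySem.Dict String (List Int) :=
  (PySem.List.enumerate names).foldl
    (fun d p => d.modify p.2 ([] : List Int) (fun l => l ++ [p.1])) PySem.Dict.empty

-- second pass, inner loop: for j, pos in enumerate(idxs): result[pos] = name if j == 0 else name + str(j)
def BFill (r : List String) (g : String × List Int) : List String :=
  (PySem.List.enumerate g.2).foldl
    (fun r p => PySem.List.pySetD r p.2 (if p.1 = 0 then g.1 else g.1 ++ PySem.Int.toStr p.1)) r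

def DistinguishUsername_alt (names : List String) : List String :=
  (BGroups names).items.foldl BFill (List.replicate names.length "")

-- ===== PRECONDITION & SPEC =====
def Spec_DistinguishUsername (names : List String) (out : List String) : Prop := out = DistinguishUsername_alt names
instance (names : List String) (out : List String) : Decidable (Spec_DistinguishUsername names out) := by unfold Spec_DistinguishUsername; infer_instance

-- ===== CLAIM (what is proved, stated in full; the proofs are below) =====
def Claim_equal_DistinguishUsername : Prop := ∀ (names : List String), Dom_DistinguishUsername names → Spec_DistinguishUsername names (DistinguishUsername names)

-- ===== LEMMAS AND PROOFS =====

-- the value both programs put at a position whose earlier occurrences are those in `pre`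
def bval (pre : List String) (n : String) : String :=
  if pre.count n = 0 then n else n ++ PySem.Int.toStr ((pre.count n : Nat) : Int)

-- the whole expected output, walking `rest` with processed prefix `pre`
def bspec (pre rest : List String) : List String :=
  match rest with
  | [] => []
  | n :: t => bval pre n :: bspec (pre ++ [n]) t

-- the value position k receives
def gfun (names : List String) (k : Nat) : String := bval (names.take k) (names.getD k "")

-- indices (from start i) of the occurrences of m, as produced by the grouping pass
def occE (m : String) (names : List String) (i : Int) : List Int :=
  ((PySem.List.enumerate names i).filter (fun p => p.2 == m)).map (·.1)

-- one write of the fill loop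
def fillStep (r : List String) (pr : Int × String) : List String :=
  PySem.List.pySetD r pr.1 pr.2

-- the (position, value) writes contributed by one dict group
def pairsOf (g : String × List Int) : List (Int × String) :=
  (PySem.List.enumerate g.2).map
    (fun p => (p.2, if p.1 = 0 then g.1 else g.1 ++ PySem.Int.toStr p.1))

-- all writes of B's second pass, in order
def pairsL (names : List String) : List (Int × String) :=
  (BGroups names).items.flatMap pairsOf

lemma occE_nil (m : String) (i : Int) : occE m [] i = [] := by
  simp [occE, PySem.List.enumerate_nil]

lemma occE_cons (m x : String) (t : List String) (i : Int) :
    occE m (x :: t) i = if x = m then i :: occE m t (i + 1) else occE m t (i + 1) := by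
  simp only [occE, PySem.List.enumerate_cons, List.filter_cons]
  by_cases h : x = m <;> simp [h]

lemma occE_getElem (m : String) : ∀ (names : List String) (i : Int) (j : Nat) (q : Int),
    (occE m names i)[j]? = some q →
    ∃ k : Nat, k < names.length ∧ q = i + k ∧ names[k]? = some m ∧ (names.take k).count m = j := by
  intro names
  induction names with
  | nil => intro i j q h; rw [occE_nil] at h; simp at h
  | cons x t ih =>
    intro i j q h
    rw [occE_cons] at h
    by_cases hx : x = m
    · rw [if_pos hx] at h
      cases j with
      | zero =>
        refine ⟨0, by simp, ?_, by simp [hx], by simp⟩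
        simp at h; omega
      | succ j' =>
        simp only [List.getElem?_cons_succ] at h
        obtain ⟨k', hk', hq, hm, hc⟩ := ih (i + 1) j' q h
        refine ⟨k' + 1, by simp; omega, by push_cast; omega, by simpa using hm, ?_⟩
        simp [hx, hc]
    · rw [if_neg hx] at h
      obtain ⟨k', hk', hq, hm, hc⟩ := ih (i + 1) j q h
      refine ⟨k' + 1, by simp; omega, by push_cast; omega, by simpa using hm, ?_⟩
      simp [hc, hx]

lemma occE_cover (m : String) : ∀ (names : List String) (i : Int) (k : Nat),
    names[k]? = some m → (occE m names i)[(names.take k).count m]? = some (i + k) := by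
  intro names
  induction names with
  | nil => intro i k h; simp at h
  | cons x t ih =>
    intro i k h
    rw [occE_cons]
    cases k with
    | zero =>
      simp only [List.getElem?_cons_zero, Option.some_inj] at h
      rw [if_pos h]
      simp
    | succ k' =>
      simp only [List.getElem?_cons_succ] at h
      have := ih (i + 1) k' h
      by_cases hx : x = m
      · rw [if_pos hx]
        have hc : ((x :: t).take (k' + 1)).count m = (t.take k').count m + 1 := by
          simp [hx]
        rw [hc]
        simp only [List.getElem?_cons_succ]
        rw [this]; congr 1; push_cast; omega
      · rw [if_neg hx]
        have hc : ((x :: t).take (k' + 1)).count m = (t.take k').count m := by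
          simp [hx]
        rw [hc, this]; congr 1; push_cast; omega

lemma BGroups_eq_swap (names : List String) :
    BGroups names = ((PySem.List.enumerate names).map Prod.swap).foldl
      (fun d p => d.modify p.1 ([] : List Int) (fun l => l ++ [p.2])) PySem.Dict.empty := by
  rw [BGroups, List.foldl_map]
  simp only [Prod.fst_swap, Prod.snd_swap]

lemma getD_BGroups (names : List String) (m : String) :
    (BGroups names).getD m [] = occE m names 0 := by
  rw [BGroups_eq_swap, PySem.Dict.getD_foldl_modify_append]
  simp [occE, List.filter_map, List.map_map, Function.comp_def, PySem.Dict.getD_empty]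

lemma nodup_keys_BGroups (names : List String) : (BGroups names).keys.Nodup := by
  rw [BGroups_eq_swap]
  exact PySem.Dict.nodup_keys_foldl_modify_key _ _ _ _ _ (by simp [PySem.Dict.keys_empty])

lemma pairsL_sound (names : List String) (pr : Int × String) (h : pr ∈ pairsL names) :
    ∃ k : Nat, k < names.length ∧ pr.1 = (k : Int) ∧ pr.2 = gfun names k := by
  rw [pairsL, List.mem_flatMap] at h
  obtain ⟨g, hg, hpr⟩ := h
  have hget : (BGroups names).get? g.1 = some g.2 :=
    PySem.Dict.get?_of_mem_items (BGroups names) (by simpa using hg) (nodup_keys_BGroups names)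
  have hocc : g.2 = occE g.1 names 0 := by
    have := getD_BGroups names g.1
    rwa [PySem.Dict.getD_eq_get?_getD, hget, Option.getD_some] at this
  rw [pairsOf, List.mem_map] at hpr
  obtain ⟨p, hp, hfp⟩ := hpr
  rw [PySem.List.mem_enumerate_iff] at hp
  obtain ⟨j, hj, hpj⟩ := hp
  have hq : (occE g.1 names 0)[j]? = some g.2[j] := by
    rw [← hocc]; exact List.getElem?_eq_getElem hj
  obtain ⟨k, hk, hqk, hm, hc⟩ := occE_getElem g.1 names 0 j g.2[j] hq
  refine ⟨k, hk, ?_, ?_⟩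
  · rw [← hfp, hpj]; simpa using hqk
  · rw [← hfp, hpj]
    have hgd : names.getD k "" = g.1 := by
      rw [List.getD_eq_getElem?_getD, hm]; rfl
    simp only [gfun, bval, hgd, hc]
    by_cases hj0 : j = 0
    · simp [hj0]
    · have h1 : ¬ ((0 : Int) + (j : Nat) = 0) := by omega
      have h2 : ¬ (j = 0) := hj0
      rw [if_neg h1, if_neg h2]
      congr 1; congr 1; omega

lemma pairsL_cover (names : List String) (k : Nat) (hk : k < names.length) :
    ((k : Int)) ∈ (pairsL names).map Prod.fst := by
  set m := names[k] with hm
  have hks : names[k]? = some m := List.getElem?_eq_getElem hk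
  have hcov := occE_cover m names 0 k hks
  have hne : occE m names 0 ≠ [] := by
    intro h; rw [h] at hcov; simp at hcov
  obtain ⟨idxs, hget⟩ : ∃ idxs, (BGroups names).get? m = some idxs := by
    cases hg : (BGroups names).get? m with
    | none =>
      exfalso; apply hne
      have := getD_BGroups names m
      rw [PySem.Dict.getD_eq_get?_getD, hg, Option.getD_none] at this
      exact this.symm
    | some idxs => exact ⟨idxs, rfl⟩
  have hocc : idxs = occE m names 0 := by
    have := getD_BGroups names m
    rwa [PySem.Dict.getD_eq_get?_getD, hget, Option.getD_some] at this
  have hitems : (m, idxs) ∈ (BGroups names).items :=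
    PySem.Dict.mem_items_of_get?_eq_some (BGroups names) hget
  set c := (names.take k).count m with hc
  have hcl : c < idxs.length := by
    rw [hocc]; exact List.getElem?_eq_some_iff.mp hcov |>.1
  have hval : idxs[c] = (k : Int) := by
    have h1 : idxs[c]? = some ((0 : Int) + (k : Nat)) := by rw [hocc]; exact hcov
    rw [List.getElem?_eq_getElem hcl] at h1
    have := Option.some.inj h1
    omega
  rw [List.mem_map]
  refine ⟨(idxs[c], if ((0 : Int) + (c : Nat)) = 0 then m else m ++ PySem.Int.toStr ((0 : Int) + (c : Nat))), ?_, by simpa using hval⟩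
  rw [pairsL, List.mem_flatMap]
  refine ⟨(m, idxs), hitems, ?_⟩
  rw [pairsOf, List.mem_map]
  exact ⟨((0 : Int) + (c : Nat), idxs[c]), (PySem.List.mem_enumerate_iff _ _ _).mpr ⟨c, hcl, rfl⟩, rfl⟩

lemma foldl_fillStep_length : ∀ (L : List (Int × String)) (r : List String),
    (L.foldl fillStep r).length = r.length := by
  intro L
  induction L with
  | nil => intro r; rfl
  | cons pr L ih =>
    intro r
    rw [List.foldl_cons, ih, fillStep, PySem.List.length_pySetD]

lemma foldl_fillStep_getElem (gf : Nat → String) : ∀ (L : List (Int × String)) (r : List String),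
    (∀ pr ∈ L, ∃ k : Nat, k < r.length ∧ pr.1 = (k : Int) ∧ pr.2 = gf k) →
    ∀ q : Nat, q < r.length →
    (L.foldl fillStep r)[q]? = if (q : Int) ∈ L.map Prod.fst then some (gf q) else r[q]? := by
  intro L
  induction L with
  | nil => intro r _ q _; simp
  | cons pr L ih =>
    intro r hL q hq
    obtain ⟨k, hk, h1, h2⟩ := hL pr (List.mem_cons_self)
    have hset : fillStep r pr = r.set k (gf k) := by
      rw [fillStep, h1, h2, PySem.List.pySetD_natCast]
    have hlen : (fillStep r pr).length = r.length := by
      rw [fillStep, PySem.List.length_pySetD]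
    rw [List.foldl_cons, ih (fillStep r pr)
        (fun p hp => by obtain ⟨k', hk', e1, e2⟩ := hL p (List.mem_cons_of_mem _ hp);
                        exact ⟨k', by omega, e1, e2⟩) q (by omega)]
    by_cases hmem : (q : Int) ∈ L.map Prod.fst
    · rw [if_pos hmem, if_pos (by simp [hmem])]
    · rw [if_neg hmem]
      by_cases hqk : q = k
      · subst hqk
        rw [hset, List.getElem?_set_self hq, if_pos (by simp [h1])]
      · rw [hset, List.getElem?_set_ne (fun h => hqk h.symm)]
        have hnm : ((q : Int) ∈ (pr :: L).map Prod.fst) → False := by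
          simp only [List.map_cons, List.mem_cons]
          rintro (h | h)
          · exact hqk (by rw [h1] at h; exact_mod_cast h)
          · exact hmem h
        rw [if_neg hnm]

lemma bspec_length : ∀ (rest pre : List String), (bspec pre rest).length = rest.length := by
  intro rest
  induction rest with
  | nil => intro pre; rfl
  | cons n t ih => intro pre; simp [bspec, ih]

lemma bspec_getElem : ∀ (rest pre : List String) (q : Nat), q < rest.length →
    (bspec pre rest)[q]? = some (bval (pre ++ rest.take q) (rest.getD q "")) := by
  intro rest
  induction rest with
  | nil => intro pre q h; simp at h
  | cons n t ih =>
    intro pre q hq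
    cases q with
    | zero => simp [bspec]
    | succ q' =>
      simp only [bspec, List.getElem?_cons_succ, List.take_succ_cons, List.getD_cons_succ]
      rw [ih (pre ++ [n]) q' (by simpa using hq), List.append_assoc]
      rfl

lemma alt_eq_bspec (names : List String) :
    DistinguishUsername_alt names = bspec [] names := by
  have hfold : DistinguishUsername_alt names =
      (pairsL names).foldl fillStep (List.replicate names.length "") := by
    rw [DistinguishUsername_alt, pairsL, List.foldl_flatMap]
    congr 1
    funext r g
    rw [pairsOf, List.foldl_map]
    rfl
  have hlen : (DistinguishUsername_alt names).length = names.length := by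
    rw [hfold, foldl_fillStep_length, List.length_replicate]
  apply List.ext_getElem?
  intro q
  by_cases hq : q < names.length
  · have hsound : ∀ pr ∈ pairsL names, ∃ k : Nat,
        k < (List.replicate names.length "").length ∧ pr.1 = (k : Int) ∧ pr.2 = gfun names k := by
      intro pr hpr
      obtain ⟨k, hk, h1, h2⟩ := pairsL_sound names pr hpr
      exact ⟨k, by simpa using hk, h1, h2⟩
    rw [hfold, foldl_fillStep_getElem (gfun names) (pairsL names) _ hsound q (by simpa using hq),
        if_pos (pairsL_cover names q hq), bspec_getElem names [] q hq]
    rfl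
  · rw [List.getElem?_eq_none (by rw [hlen]; omega),
        List.getElem?_eq_none (by rw [bspec_length]; omega)]

-- ===== A-side lemmas (as before) =====
lemma set_append_len {α : Type} (a : List α) (b : List α) (v : α) :
    (a ++ b).set a.length v = a ++ b.set 0 v := by
  induction a with
  | nil => simp
  | cons x t ih => simp [ih]

lemma fold_eq_bspec :
    ∀ (rest pre done : List String) (tb : PySem.Dict String Int),
    done.length = pre.length →
    (∀ m, tb.get? m = if pre.count m = 0 then none else some ((pre.count m : Nat) : Int)) →
    ((PySem.List.enumerate rest (pre.length : Int)).foldl AStep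
      (done ++ List.replicate rest.length "", tb)).1 = done ++ bspec pre rest := by
  intro rest
  induction rest with
  | nil => intro pre done tb hlen htb; simp [PySem.List.enumerate_nil, bspec]
  | cons n t ih =>
    intro pre done tb hlen htb
    rw [PySem.List.enumerate_cons, List.foldl_cons]
    have hset : ∀ v : String,
        PySem.List.pySetD (done ++ List.replicate (n :: t).length "") (pre.length : Int) v
        = (done ++ [v]) ++ List.replicate t.length "" := by
      intro v
      rw [← hlen, PySem.List.pySetD_natCast, set_append_len]
      simp [List.replicate_succ]
    have htb' : ∀ v' : Int,
        (∀ m, (tb.insert n v').get? m =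
          if (pre ++ [n]).count m = 0 then none else some (((pre ++ [n]).count m : Nat) : Int)) ↔
        (v' = ((pre.count n : Nat) : Int) + 1) := by
      intro v'; constructor
      · intro hall
        have h1 := hall n
        rw [PySem.Dict.get?_insert_self] at h1
        simp only [List.count_append, List.count_cons, List.count_nil] at h1
        split at h1 <;> simp_all
      · intro hv m
        by_cases hm : m = n
        · subst hm
          rw [PySem.Dict.get?_insert_self, hv]
          simp [List.count_append]
        · rw [PySem.Dict.get?_insert_of_ne _ _ hm, htb m]
          have hnm : ¬ n = m := fun h => hm h.symm
          simp [List.count_append, hnm]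
    have hlen2 : (done ++ [bval pre n]).length = (pre ++ [n]).length := by simp [hlen]
    have hcast : ((pre.length : Int) + 1) = (((pre ++ [n]).length : Nat) : Int) := by
      simp only [List.length_append, List.length_cons, List.length_nil]; omega
    by_cases hc : pre.count n = 0
    · have hg : tb.get? n = none := by rw [htb n]; simp [hc]
      have hstep : AStep (done ++ List.replicate (n :: t).length "", tb) ((pre.length : Int), n)
          = ((done ++ [bval pre n]) ++ List.replicate t.length "", tb.insert n 1) := by
        simp only [AStep, hg, hset, bval, hc]
        simp
      rw [hstep, hcast, ih (pre ++ [n]) (done ++ [bval pre n]) _ hlen2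
            (((htb' 1).mpr (by simp [hc]))), bspec, List.append_assoc, List.cons_append,
          List.nil_append]
    · have hg : tb.get? n = some ((pre.count n : Nat) : Int) := by rw [htb n]; simp [hc]
      have hstep : AStep (done ++ List.replicate (n :: t).length "", tb) ((pre.length : Int), n)
          = ((done ++ [bval pre n]) ++ List.replicate t.length "",
             tb.insert n (((pre.count n : Nat) : Int) + 1)) := by
        simp only [AStep, hg, hset, bval, hc]
        simp
      rw [hstep, hcast, ih (pre ++ [n]) (done ++ [bval pre n]) _ hlen2
            (((htb' _).mpr rfl)), bspec, List.append_assoc, List.cons_append, List.nil_append]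

-- ===== VERDICT (by name: the statement is the Claim_ definition above) =====
theorem DistinguishUsername_spec : Claim_equal_DistinguishUsername := by
  intro names _
  show DistinguishUsername names = DistinguishUsername_alt names
  have hA : DistinguishUsername names = [] ++ bspec [] names := by
    unfold DistinguishUsername
    have := fold_eq_bspec names [] [] PySem.Dict.empty (by simp)
      (by intro m; simp [PySem.Dict.get?_empty])
    simpa using this
  rw [hA, alt_eq_bspec, List.nil_append]
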